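-- pv_equiv track=rewrite | github.com/LNPappas/Advent-of-Code | Day4.py | consecutive_check
-- ===== SOURCE A (Python) =====
-- def consecutive_check(l):
--     l1 = [str(x) for x in l]
--     l2 = []
--     for x in l1:
--         for index, value in enumerate(x):
--             if index != 0:
--                 if int(value) >= int(x[index-1]):
--                     if index == len(x)-1:
--                         l2.append(x)
--                 else:
--                     break
--     return l2
-- ===== SOURCE B (Python) =====
-- def consecutive_check(l):
--     # Keep the decimal strings (2+ chars) whose digits are non-decreasing:
--     # a string of digits is non-decreasing exactly when sorting it leaves it unchanged.
--     return [s for s in map(str, l) if len(s) >= 2 and sorted(s) == list(s)]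
-- ===== Notes on version B (the rewrite author's own statement) =====
-- stated objective: simpler
-- what changed: Replaces A's nested enumerate loop with per-digit int() parsing and early break by a single comprehension that keeps s when sorted(s) == list(s) (a digit string is non-decreasing iff sorting fixes it); the len(s) >= 2 guard expresses A's rule that one-digit numbers are never kept; Pre_ excludes negative inputs, on which A raises ValueError.
import Mathlib
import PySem

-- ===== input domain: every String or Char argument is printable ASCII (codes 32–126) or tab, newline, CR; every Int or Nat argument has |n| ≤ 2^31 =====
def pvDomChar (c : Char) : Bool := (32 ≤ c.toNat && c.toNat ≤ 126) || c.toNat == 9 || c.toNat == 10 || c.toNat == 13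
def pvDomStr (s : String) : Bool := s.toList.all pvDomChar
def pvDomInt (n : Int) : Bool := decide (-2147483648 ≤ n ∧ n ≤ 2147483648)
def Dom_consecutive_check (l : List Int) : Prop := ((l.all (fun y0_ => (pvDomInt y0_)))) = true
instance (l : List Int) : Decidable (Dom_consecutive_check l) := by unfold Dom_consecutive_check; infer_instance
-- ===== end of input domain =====

-- B keeps a decimal string iff it has ≥ 2 chars and sorting its digits fixes it (non-decreasing),
-- replacing A's per-digit early-exit scan; equivalence is proved on non-negative inputs (Pre_),
-- since A raises ValueError (int('-')) on every negative element.

-- ===== PORT A =====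
-- inner 'for index, value in enumerate(x)' loop, carrying l2; 'break' / fall-through return l2.
-- The '| _, _ => l2' arm is where Python's int() raises ValueError ('-' char); excluded by Pre_.
def pvA_inner (x : String) : List (Int × Char) → List String → List String
  | [], l2 => l2
  | (index, value) :: rest, l2 =>
    if index ≠ 0 then
      match PySem.Int.ofChars? [value],
            (PySem.Str.pyGet? x (index - 1)).bind (fun c => PySem.Int.ofChars? [c]) with
      | some cur, some prev =>
        if prev ≤ cur then
          if index = PySem.Str.len x - 1 then pvA_inner x rest (l2 ++ [x])
          else pvA_inner x rest l2
        else l2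
      | _, _ => l2
    else pvA_inner x rest l2

def consecutive_check (l : List Int) : List String :=
  let l1 := l.map PySem.Int.toStr
  l1.foldl (fun l2 x => pvA_inner x (PySem.List.enumerate x.toList 0) l2) []

-- ===== PORT B =====
def pvB_keep (s : String) : Bool :=
  decide (2 ≤ PySem.Str.len s) && (PySem.List.sorted s.toList (fun c => c) == s.toList)

def consecutive_check_alt (l : List Int) : List String :=
  (l.map PySem.Int.toStr).filter pvB_keep

-- ===== PRECONDITION & SPEC =====
-- Pre_ excludes lists with a negative element: there A raises ValueError (int('-')).
def Pre_consecutive_check (l : List Int) : Prop := ∀ x ∈ l, 0 ≤ x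
instance (l : List Int) : Decidable (Pre_consecutive_check l) := by unfold Pre_consecutive_check; infer_instance

def pvWitness_consecutive_check : List Int := [12, 5, 221, 1223, 0, 99]

def Spec_consecutive_check (l : List Int) (out : List String) : Prop := out = consecutive_check_alt l
instance (l : List Int) (out : List String) : Decidable (Spec_consecutive_check l out) := by unfold Spec_consecutive_check; infer_instance

-- ===== CLAIM (what is proved, stated in full; the proofs are below) =====
def Claim_equal_consecutive_check : Prop := ∀ (l : List Int), Dom_consecutive_check l → Pre_consecutive_check l → Spec_consecutive_check l (consecutive_check l)

-- ===== LEMMAS AND PROOFS =====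

-- decimal digit characters
def pvIsDig (c : Char) : Bool := 48 ≤ c.toNat && c.toNat ≤ 57

lemma pv_digitChar_dig : ∀ d : Nat, d < 10 → pvIsDig (Nat.digitChar d) = true := by decide

lemma pv_toDigitsCore_dig (fuel : Nat) : ∀ (m : Nat) (acc : List Char),
    (∀ c ∈ acc, pvIsDig c = true) → ∀ c ∈ Nat.toDigitsCore 10 fuel m acc, pvIsDig c = true := by
  induction fuel with
  | zero => intro m acc hacc c hc; exact hacc c hc
  | succ f ih =>
    intro m acc hacc c hc
    rw [Nat.toDigitsCore] at hc
    by_cases h : m / 10 = 0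
    · rw [if_pos h, List.mem_cons] at hc
      rcases hc with hc | hc
      · subst hc; exact pv_digitChar_dig _ (Nat.mod_lt _ (by norm_num))
      · exact hacc c hc
    · rw [if_neg h] at hc
      refine ih (m / 10) _ ?_ c hc
      intro d hd
      rw [List.mem_cons] at hd
      rcases hd with hd | hd
      · subst hd; exact pv_digitChar_dig _ (Nat.mod_lt _ (by norm_num))
      · exact hacc d hd

lemma pv_toStr_dig (v : Int) (hv : 0 ≤ v) :
    ∀ c ∈ (PySem.Int.toStr v).toList, pvIsDig c = true := by
  rw [PySem.Int.toList_toStr]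
  show ∀ c ∈ PySem.Int.toChars v, pvIsDig c = true
  unfold PySem.Int.toChars
  rw [if_neg (by omega)]
  exact pv_toDigitsCore_dig _ _ _ (by simp)

lemma pv_dig_ofChars (c : Char) (h : pvIsDig c = true) :
    PySem.Int.ofChars? [c] = some ((c.toNat : Int) - 48) := by
  unfold pvIsDig at h
  simp only [Bool.and_eq_true, decide_eq_true_eq] at h
  have h10 : c.toNat = 48 ∨ c.toNat = 49 ∨ c.toNat = 50 ∨ c.toNat = 51 ∨ c.toNat = 52 ∨
      c.toNat = 53 ∨ c.toNat = 54 ∨ c.toNat = 55 ∨ c.toNat = 56 ∨ c.toNat = 57 := by omega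
  have hc := Char.ofNat_toNat c
  rcases h10 with h0 | h0 | h0 | h0 | h0 | h0 | h0 | h0 | h0 | h0 <;>
    (rw [h0] at hc; rw [← hc]; decide)

lemma pv_char_le_iff (c d : Char) : c ≤ d ↔ c.toNat ≤ d.toNat := ge_iff_le

-- the comparisons still pending from position k on: digits at i-1, i compare ≤ for all i ∈ [k, len)
abbrev pvChainFrom (cs : List Char) (k : Nat) : Prop :=
  ∀ i < cs.length, k ≤ i → cs.getD (i - 1) ' ' ≤ cs.getD i ' '

lemma pvA_inner_spec (x : String) (hdig : ∀ c ∈ x.toList, pvIsDig c = true) (fuel : Nat) :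
    ∀ (k : Nat), 1 ≤ k → x.toList.length - k ≤ fuel → ∀ l2,
    pvA_inner x (PySem.List.enumerate (x.toList.drop k) (k : Int)) l2 =
      l2 ++ (if k + 1 ≤ x.toList.length ∧ pvChainFrom x.toList k then [x] else []) := by
  induction fuel with
  | zero =>
    intro k hk hfuel l2
    rw [List.drop_eq_nil_of_le (by omega)]
    rw [if_neg (by omega)]
    simp [PySem.List.enumerate, pvA_inner]
  | succ f ih =>
    intro k hk hfuel l2
    by_cases hkn : k < x.toList.length
    · have hk1 : k - 1 < x.toList.length := by omega
      rw [List.drop_eq_getElem_cons hkn, PySem.List.enumerate_cons]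
      have e1 : PySem.Int.ofChars? [x.toList[k]] = some ((x.toList[k].toNat : Int) - 48) :=
        pv_dig_ofChars _ (hdig _ (List.getElem_mem hkn))
      have e2 : (PySem.Str.pyGet? x ((k : Int) - 1)).bind (fun c => PySem.Int.ofChars? [c])
          = some ((x.toList[k - 1].toNat : Int) - 48) := by
        have hcast : (k : Int) - 1 = ((k - 1 : Nat) : Int) := by omega
        rw [hcast, PySem.Str.pyGet?_natCast, List.getElem?_eq_getElem hk1]
        simp [pv_dig_ofChars _ (hdig _ (List.getElem_mem hk1))]
      simp only [pvA_inner, e1, e2]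
      rw [if_pos (show (k : Int) ≠ 0 by omega)]
      rw [PySem.Str.len_eq]
      have hcast1 : (k : Int) + 1 = ((k + 1 : Nat) : Int) := by push_cast; ring
      by_cases hle : x.toList[k - 1] ≤ x.toList[k]
      · have hle' : ((x.toList[k - 1].toNat : Int) - 48) ≤ ((x.toList[k].toNat : Int) - 48) := by
          have := (pv_char_le_iff _ _).mp hle; omega
        rw [if_pos hle']
        by_cases hlast : k = x.toList.length - 1
        · rw [if_pos (show (k : Int) = (x.toList.length : Int) - 1 by omega)]
          rw [hcast1, ih (k + 1) (by omega) (by omega) (l2 ++ [x])]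
          rw [if_neg (by omega)]
          have hcond : k + 1 ≤ x.toList.length ∧ pvChainFrom x.toList k := by
            refine ⟨by omega, ?_⟩
            intro i hi hki
            have : i = k := by omega
            subst this
            rw [List.getD_eq_getElem _ _ hk1, List.getD_eq_getElem _ _ hkn]
            exact hle
          rw [if_pos hcond]
          simp
        · rw [if_neg (show ¬ (k : Int) = (x.toList.length : Int) - 1 by omega)]
          rw [hcast1, ih (k + 1) (by omega) (by omega) l2]
          congr 1
          have hiff2 : (k + 1 + 1 ≤ x.toList.length ∧ pvChainFrom x.toList (k + 1)) ↔
              (k + 1 ≤ x.toList.length ∧ pvChainFrom x.toList k) := by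
            constructor
            · rintro ⟨h1, h2⟩
              refine ⟨by omega, ?_⟩
              intro i hi hki
              rcases Nat.eq_or_lt_of_le hki with h | h
              · subst h
                rw [List.getD_eq_getElem _ _ hk1, List.getD_eq_getElem _ _ hkn]
                exact hle
              · exact h2 i hi (by omega)
            · rintro ⟨h1, h2⟩
              exact ⟨by omega, fun i hi hki => h2 i hi (by omega)⟩
          rw [if_congr hiff2 rfl rfl]
      · have hle' : ¬ ((x.toList[k - 1].toNat : Int) - 48) ≤ ((x.toList[k].toNat : Int) - 48) := by
          intro hcon
          exact hle ((pv_char_le_iff _ _).mpr (by omega))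
        rw [if_neg hle']
        have hnc : ¬ (k + 1 ≤ x.toList.length ∧ pvChainFrom x.toList k) := by
          rintro ⟨h1, h2⟩
          have := h2 k hkn le_rfl
          rw [List.getD_eq_getElem _ _ hk1, List.getD_eq_getElem _ _ hkn] at this
          exact hle this
        rw [if_neg hnc]
        simp
    · rw [List.drop_eq_nil_of_le (by omega)]
      rw [if_neg (by omega)]
      simp [PySem.List.enumerate, pvA_inner]

lemma pvA_inner_full (x : String) (hdig : ∀ c ∈ x.toList, pvIsDig c = true) (l2 : List String) :
    pvA_inner x (PySem.List.enumerate x.toList 0) l2 =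
      (if pvB_keep x = true then l2 ++ [x] else l2) := by
  have hkeep : pvB_keep x = true ↔
      (2 ≤ x.toList.length ∧ pvChainFrom x.toList 1) := by
    unfold pvB_keep
    rw [Bool.and_eq_true, decide_eq_true_eq, beq_iff_eq, PySem.Str.len_eq]
    constructor
    · rintro ⟨h1, h2⟩
      refine ⟨by exact_mod_cast h1, ?_⟩
      have hp : List.Pairwise (fun a b : Char => a ≤ b) x.toList := by
        have := PySem.List.sorted_pairwise x.toList (fun c => c)
        rwa [h2] at this
      have hch := (List.isChain_iff_pairwise).mpr hp
      rw [List.isChain_iff_getElem] at hch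
      intro i hi hki
      rcases Nat.exists_eq_succ_of_ne_zero (by omega : i ≠ 0) with ⟨j, rfl⟩
      have hi1 : j + 1 - 1 < x.toList.length := by omega
      rw [List.getD_eq_getElem _ _ hi1, List.getD_eq_getElem _ _ hi]
      have := hch j (by omega)
      simpa using this
    · rintro ⟨h1, h2⟩
      refine ⟨by exact_mod_cast h1, ?_⟩
      apply PySem.List.sorted_eq_self_of_pairwise
      apply (List.isChain_iff_pairwise).mp
      rw [List.isChain_iff_getElem]
      intro i hi
      have := h2 (i + 1) hi (by omega)
      rw [List.getD_eq_getElem _ _ (by omega : i + 1 - 1 < x.toList.length),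
          List.getD_eq_getElem _ _ hi] at this
      simpa using this
  cases hx : x.toList with
  | nil =>
    have hb : pvB_keep x = false := by
      rw [Bool.eq_false_iff]
      intro hcon
      have := (hkeep.mp hcon).1
      rw [hx] at this
      simp at this
    rw [hb]
    simp [PySem.List.enumerate, pvA_inner]
  | cons c t =>
    rw [PySem.List.enumerate_cons]
    rw [show pvA_inner x ((0, c) :: PySem.List.enumerate t (0 + 1)) l2
        = pvA_inner x (PySem.List.enumerate t (0 + 1)) l2 by simp [pvA_inner]]
    have ht : t = x.toList.drop 1 := by simp [hx]
    have h01 : (0 : Int) + 1 = ((1 : Nat) : Int) := by norm_num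
    rw [ht, h01, pvA_inner_spec x hdig x.toList.length 1 le_rfl (by omega) l2]
    have hiff : (1 + 1 ≤ x.toList.length ∧ pvChainFrom x.toList 1) ↔ pvB_keep x = true := by
      rw [hkeep]
    rw [if_congr hiff rfl rfl]
    split_ifs <;> simp

-- ===== VERDICT (by name: the statement is the Claim_ definition above) =====
theorem consecutive_check_spec : Claim_equal_consecutive_check := by
  intro l _hdom hpre
  show consecutive_check l = consecutive_check_alt l
  unfold consecutive_check consecutive_check_alt
  simp only []
  rw [PySem.List.foldl_congr_mem (l.map PySem.Int.toStr)
      (fun l2 x => pvA_inner x (PySem.List.enumerate x.toList 0) l2)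
      (fun acc x => if pvB_keep x = true then acc ++ [(fun s : String => s) x] else acc) []
      (by
        intro acc x hx
        obtain ⟨v, hv, rfl⟩ := List.mem_map.mp hx
        exact pvA_inner_full _ (pv_toStr_dig v (hpre v hv)) acc)]
  rw [PySem.List.foldl_append_if pvB_keep (fun s : String => s)]
  simp
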